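-- pv_equiv track=rewrite | github.com/luca16s/INF1025 | PROVA_01/P1Q3_GIANFIGUEIREDO_2012431.py | decifraPalavraOriginal
-- ===== SOURCE A (Python) =====
-- def decifraPalavraOriginal(consoantes, vogais):
--     if len(consoantes) == 0 or len(vogais) == 0:
--         return consoantes + vogais
--
--     consoanteAtual = consoantes[0]
--     if consoanteAtual == '*':
--         primeiraSequencia = vogais[-1]
--         return primeiraSequencia + decifraPalavraOriginal(consoantes[1:], vogais[:-1])
--     else:
--         primeiraSequencia = consoanteAtual
--
--     resto = decifraPalavraOriginal(consoantes[1:], vogais)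
--
--     return primeiraSequencia + resto
-- ===== SOURCE B (Python) =====
-- def decifraPalavraOriginal(consoantes, vogais):
--     parts = consoantes.split('*')
--     m = len(vogais)
--     k = min(len(parts) - 1, m)
--     pieces = []
--     for j in range(k):
--         pieces.append(parts[j])
--         pieces.append(vogais[m - 1 - j])
--     return ''.join(pieces) + '*'.join(parts[k:]) + vogais[:m - k]
-- ===== Notes on version B (the rewrite author's own statement) =====
-- stated objective: faster
-- what changed: Replaced the O(n^2) character recursion with slicing/concatenation by splitting the consonants on '*' once and interleaving the parts with the vowels read from the end, joining once.
import Mathlib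
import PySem

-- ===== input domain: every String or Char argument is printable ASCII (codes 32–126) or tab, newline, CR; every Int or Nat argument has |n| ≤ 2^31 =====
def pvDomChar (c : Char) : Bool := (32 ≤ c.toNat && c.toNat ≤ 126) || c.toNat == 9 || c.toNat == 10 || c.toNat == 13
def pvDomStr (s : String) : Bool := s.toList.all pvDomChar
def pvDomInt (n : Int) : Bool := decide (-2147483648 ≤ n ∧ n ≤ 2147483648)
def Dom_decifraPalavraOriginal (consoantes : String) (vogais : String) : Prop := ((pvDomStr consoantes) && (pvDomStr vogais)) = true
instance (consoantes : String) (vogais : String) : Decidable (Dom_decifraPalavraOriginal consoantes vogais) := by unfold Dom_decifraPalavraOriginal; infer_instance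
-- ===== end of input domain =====

-- B replaces A's O(n^2) recursion with slicing by one split of the consonants on '*'
-- interleaved with the vowels taken from the end (objective: faster, asymptotic).

-- ===== PORT A =====
-- A's recursion, transliterated on List Char (consoantes[0], vogais[-1], slices [1:], [:-1]).
def pvARec : List Char → List Char → List Char
  | [], vs => vs                                   -- len(consoantes) == 0: return consoantes + vogais
  | c :: cs, [] => c :: cs                         -- len(vogais) == 0: return consoantes + vogais
  | c :: cs, v :: vs =>
      if c = '*' then
        (v :: vs).getLastD ' ' :: pvARec cs (v :: vs).dropLast   -- vogais[-1] + f(consoantes[1:], vogais[:-1])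
      else
        c :: pvARec cs (v :: vs)                   -- consoanteAtual + f(consoantes[1:], vogais)

def decifraPalavraOriginal (consoantes : String) (vogais : String) : String :=
  String.ofList (pvARec consoantes.toList vogais.toList)

-- ===== PORT B =====
-- consoantes.split('*'): exact hand port of Python's str.split with separator '*'.
def pvSplitStar : List Char → List (List Char)
  | [] => [[]]
  | c :: cs =>
      if c = '*' then [] :: pvSplitStar cs
      else
        match pvSplitStar cs with
        | [] => [[c]]          -- unreachable: split never returns an empty list
        | p :: ps => (c :: p) :: ps

-- '*'.join(parts): the untouched tail of the consonants once the vowels ran out.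
def pvJoinStar : List (List Char) → List Char
  | [] => []
  | [p] => p
  | p :: ps => p ++ '*' :: pvJoinStar ps

-- Source B's loop: walk the parts and the reversed vowels together; when the parts run
-- out append the unused vowels (vogais[:m-k]); when the vowels run out join the
-- remaining parts back with '*'.
def pvWeave : List (List Char) → List Char → List Char
  | [], rv => rv.reverse
  | [p], rv => p ++ rv.reverse
  | p :: ps, [] => pvJoinStar (p :: ps)
  | p :: ps, r :: rv => p ++ r :: pvWeave ps rv

def decifraPalavraOriginal_alt (consoantes : String) (vogais : String) : String :=
  String.ofList (pvWeave (pvSplitStar consoantes.toList) vogais.toList.reverse)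

-- ===== PRECONDITION & SPEC =====
def Spec_decifraPalavraOriginal (consoantes : String) (vogais : String) (out : String) : Prop := out = decifraPalavraOriginal_alt consoantes vogais
instance (consoantes : String) (vogais : String) (out : String) : Decidable (Spec_decifraPalavraOriginal consoantes vogais out) := by unfold Spec_decifraPalavraOriginal; infer_instance

-- ===== CLAIM (what is proved, stated in full; the proofs are below) =====
def Claim_equal_decifraPalavraOriginal : Prop := ∀ (consoantes : String) (vogais : String), Dom_decifraPalavraOriginal consoantes vogais → Spec_decifraPalavraOriginal consoantes vogais (decifraPalavraOriginal consoantes vogais)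

-- ===== LEMMAS AND PROOFS =====
theorem pvSplitStar_ne_nil (cs : List Char) : pvSplitStar cs ≠ [] := by
  cases cs with
  | nil => simp [pvSplitStar]
  | cons c cs =>
    simp only [pvSplitStar]
    split_ifs
    · simp
    · cases pvSplitStar cs <;> simp

theorem pvJoinStar_split (cs : List Char) : pvJoinStar (pvSplitStar cs) = cs := by
  induction cs with
  | nil => simp [pvSplitStar, pvJoinStar]
  | cons c cs ih =>
    simp only [pvSplitStar]
    by_cases hc : c = '*'
    · subst hc
      simp only [if_true]
      cases h : pvSplitStar cs with
      | nil => exact absurd h (pvSplitStar_ne_nil cs)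
      | cons p ps =>
        rw [h] at ih
        simp [pvJoinStar, ih]
    · rw [if_neg hc]
      cases h : pvSplitStar cs with
      | nil => exact absurd h (pvSplitStar_ne_nil cs)
      | cons p ps =>
        rw [h] at ih
        cases ps with
        | nil => simp_all [pvJoinStar]
        | cons q qs => simp_all [pvJoinStar]

theorem pvWeave_cons (c : Char) (p : List Char) (ps : List (List Char)) (ws : List Char) :
    pvWeave ((c :: p) :: ps) ws = c :: pvWeave (p :: ps) ws := by
  cases ps with
  | nil => cases ws <;> simp [pvWeave]
  | cons q qs => cases ws <;> simp [pvWeave, pvJoinStar]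

theorem pvARec_eq_weave (cs : List Char) :
    ∀ ws : List Char, pvARec cs ws.reverse = pvWeave (pvSplitStar cs) ws := by
  induction cs with
  | nil => intro ws; simp [pvARec, pvSplitStar, pvWeave]
  | cons c cs ih =>
    intro ws
    by_cases hc : c = '*'
    · subst hc
      cases ws with
      | nil =>
        have h1 : pvARec ('*' :: cs) ([] : List Char).reverse = '*' :: cs := by
          simp [pvARec]
        rw [h1]
        simp only [pvSplitStar, if_true]
        cases h : pvSplitStar cs with
        | nil => exact absurd h (pvSplitStar_ne_nil cs)
        | cons p ps =>
          have hj := pvJoinStar_split cs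
          rw [h] at hj
          have hw : pvWeave ([] :: p :: ps) ([] : List Char) = '*' :: pvJoinStar (p :: ps) := by
            cases ps <;> simp [pvWeave, pvJoinStar]
          rw [hw, hj]
      | cons w wt =>
        have hrev : (w :: wt).reverse = wt.reverse ++ [w] := by simp
        rw [hrev]
        cases hw : wt.reverse ++ [w] with
        | nil => simp at hw
        | cons x xs =>
          rw [pvARec, ← hw]
          simp only [List.getLastD_concat, List.dropLast_concat]
          rw [ih wt]
          simp only [pvSplitStar, if_true]
          cases h : pvSplitStar cs with
          | nil => exact absurd h (pvSplitStar_ne_nil cs)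
          | cons p ps => simp [pvWeave]
    · cases ws with
      | nil =>
        have h1 : pvARec (c :: cs) ([] : List Char).reverse = c :: cs := by
          simp [pvARec]
        rw [h1]
        simp only [pvSplitStar, if_neg hc]
        cases h : pvSplitStar cs with
        | nil => exact absurd h (pvSplitStar_ne_nil cs)
        | cons p ps =>
          have hj := pvJoinStar_split cs
          rw [h] at hj
          cases ps with
          | nil => simp_all [pvWeave, pvJoinStar]
          | cons q qs => simp_all [pvWeave, pvJoinStar]
      | cons w wt =>
        have hrev : (w :: wt).reverse = wt.reverse ++ [w] := by simp
        rw [hrev]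
        cases hw : wt.reverse ++ [w] with
        | nil => simp at hw
        | cons x xs =>
          rw [pvARec, ← hw, ← hrev]
          simp only [if_neg hc]
          rw [ih (w :: wt)]
          simp only [pvSplitStar, if_neg hc]
          cases h : pvSplitStar cs with
          | nil => exact absurd h (pvSplitStar_ne_nil cs)
          | cons p ps => rw [pvWeave_cons]

-- ===== VERDICT (by name: the statement is the Claim_ definition above) =====
theorem decifraPalavraOriginal_spec : Claim_equal_decifraPalavraOriginal := by
  intro consoantes vogais _
  unfold Spec_decifraPalavraOriginal decifraPalavraOriginal decifraPalavraOriginal_alt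
  have h := pvARec_eq_weave consoantes.toList vogais.toList.reverse
  rw [List.reverse_reverse] at h
  exact congrArg String.ofList h
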